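-- pv_equiv track=rewrite | github.com/thiennguyen982/FastAPI | Algorithm/fix_potholes.py | fix_potholes
-- ===== SOURCE A (Python) =====
-- def fix_potholes(S):
--     fixed_section = 0
--
--     for i in range(len(S)):
--         if S[i] == "X":
--             S = S[i:]
--             break
--
--     while S:
--         temp_s = S[0:3]
--         if "X" in temp_s:
--             fixed_section += 1
--         S = S[3:]
--
--     return fixed_section
-- ===== SOURCE B (Python) =====
-- def fix_potholes(S):
--     count = 0
--     started = False
--     seen = False
--     pos = 0
--     for c in S:
--         if not started:
--             if c != "X":
--                 continue
--             started = True
--         if c == "X":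
--             seen = True
--         pos += 1
--         if pos == 3:
--             if seen:
--                 count += 1
--             seen = False
--             pos = 0
--     if pos > 0 and seen:
--         count += 1
--     return count
-- ===== Notes on version B (the rewrite author's own statement) =====
-- stated objective: faster
-- what changed: Replaces the index scan plus repeated O(n) slicing (S=S[i:], S=S[3:]) with a single left-to-right pass carrying (started, seen-X-in-chunk, position-in-chunk) state, so no slices are built at all.
import Mathlib
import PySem

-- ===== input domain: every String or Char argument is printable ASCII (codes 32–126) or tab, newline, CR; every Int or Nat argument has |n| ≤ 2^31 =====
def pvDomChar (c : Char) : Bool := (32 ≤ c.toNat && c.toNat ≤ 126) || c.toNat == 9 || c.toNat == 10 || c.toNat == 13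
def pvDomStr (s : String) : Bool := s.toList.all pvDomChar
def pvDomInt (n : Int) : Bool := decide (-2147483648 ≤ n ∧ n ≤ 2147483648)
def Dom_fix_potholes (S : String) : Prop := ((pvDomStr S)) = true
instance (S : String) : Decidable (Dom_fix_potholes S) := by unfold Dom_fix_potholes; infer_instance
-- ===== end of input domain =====

-- B replaces A's index scan plus repeated slicing with one left-to-right pass carrying
-- (started, count, seen, position-in-chunk) state; objective: faster (no slices built).

-- ===== PORT A =====
-- 'for i in range(len(S)): if S[i] == "X": S = S[i:]; break'
def fixPotholesFind (L : List Char) (i : Nat) : List Char :=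
  if h : i < L.length then
    if PySem.List.pyGet? L (i : Int) == some 'X' then
      PySem.List.slice L (some (i : Int)) none
    else fixPotholesFind L (i + 1)
  else L
termination_by L.length - i

-- 'while S: temp_s = S[0:3]; if "X" in temp_s: fixed_section += 1; S = S[3:]'
def fixPotholesChunks (L : List Char) (fixed_section : Int) : Int :=
  if hL : L = [] then fixed_section
  else
    let temp_s := PySem.List.slice L (some 0) (some 3)
    let fixed_section := if PySem.Chars.isIn ['X'] temp_s then fixed_section + 1 else fixed_section
    fixPotholesChunks (PySem.List.slice L (some ((3 : Nat) : Int)) none) fixed_section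
termination_by L.length
decreasing_by
  rw [PySem.List.slice_from_natCast]
  have := List.length_pos_of_ne_nil hL
  simp only [List.length_drop]
  omega

def fix_potholes (S : String) : Int :=
  fixPotholesChunks (fixPotholesFind S.toList 0) 0

-- ===== PORT B =====
-- loop body of Source B: state = (started, count, seen, pos)
def fixPotholesStep (st : Bool × Int × Bool × Nat) (c : Char) : Bool × Int × Bool × Nat :=
  let (started, count, seen, pos) := st
  if !started && c != 'X' then (started, count, seen, pos)   -- 'continue'
  else
    let seen := seen || c == 'X'
    let pos := pos + 1
    if pos == 3 then (true, count + (if seen then 1 else 0), false, 0)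
    else (true, count, seen, pos)

def fix_potholes_alt (S : String) : Int :=
  let st := S.toList.foldl fixPotholesStep (false, 0, false, 0)
  if st.2.2.2 > 0 && st.2.2.1 then st.2.1 + 1 else st.2.1

-- ===== PRECONDITION & SPEC =====
def Spec_fix_potholes (S : String) (out : Int) : Prop := out = fix_potholes_alt S
instance (S : String) (out : Int) : Decidable (Spec_fix_potholes S out) := by unfold Spec_fix_potholes; infer_instance

-- ===== CLAIM (what is proved, stated in full; the proofs are below) =====
def Claim_equal_fix_potholes : Prop := ∀ (S : String), Dom_fix_potholes S → Spec_fix_potholes S (fix_potholes S)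

-- ===== LEMMAS AND PROOFS =====

-- finalisation of B's state (the trailing 'if pos > 0 and seen' of Source B)
def pvFin (st : Bool × Int × Bool × Nat) : Int :=
  if st.2.2.2 > 0 && st.2.2.1 then st.2.1 + 1 else st.2.1

lemma isIn_X (l : List Char) : PySem.Chars.isIn ['X'] l = true ↔ 'X' ∈ l := by
  rw [PySem.Chars.isIn_iff_infix]; exact List.singleton_infix_iff 'X' l

-- A's chunk loop on an X-free list adds nothing
lemma chunks_nil (acc : Int) : fixPotholesChunks [] acc = acc := by
  simp [fixPotholesChunks]

lemma chunks_no_X : ∀ n (L : List Char), L.length ≤ n → 'X' ∉ L →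
    ∀ acc, fixPotholesChunks L acc = acc := by
  intro n
  induction n with
  | zero =>
    intro L hn _ acc
    cases L with
    | nil => exact chunks_nil acc
    | cons a t => simp at hn
  | succ n ih =>
    intro L hn hX acc
    by_cases hL : L = []
    · subst hL; exact chunks_nil acc
    · have hnoX : ¬ PySem.Chars.isIn ['X'] (PySem.List.slice L (some 0) (some 3)) = true := by
        rw [isIn_X]
        intro h
        exact hX (PySem.List.mem_of_mem_slice (xs := L) (some 0) (some 3) h)
      rw [fixPotholesChunks, dif_neg hL]
      show fixPotholesChunks (PySem.List.slice L (some ((3 : Nat) : Int)) none)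
          (if PySem.Chars.isIn ['X'] (PySem.List.slice L (some 0) (some 3)) then acc + 1 else acc) = acc
      rw [if_neg hnoX, PySem.List.slice_from_natCast]
      have hlen : (L.drop 3).length ≤ n := by
        have := List.length_pos_of_ne_nil hL
        simp only [List.length_drop]
        omega
      exact ih _ hlen (fun h => hX (List.mem_of_mem_drop h)) acc

-- core: once started, B's fold computes exactly A's chunk loop
lemma core : ∀ n (L : List Char), L.length ≤ n → ∀ count,
    pvFin (L.foldl fixPotholesStep (true, count, false, 0)) = fixPotholesChunks L count := by
  intro n
  induction n using Nat.strong_induction_on with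
  | _ n ih =>
    intro L hn count
    match L, hn with
    | [], _ => simp [pvFin, chunks_nil]
    | [a], _ =>
      have h1 : PySem.List.slice [a] (some 0) (some 3) = [a] := by
        simpa using PySem.List.slice_natCast (xs := [a]) (a := 0) (b := 3)
      have h2 : PySem.List.slice [a] (some ((3 : Nat) : Int)) none = ([] : List Char) := by
        rw [PySem.List.slice_from_natCast]; rfl
      rw [fixPotholesChunks, dif_neg (by simp)]
      show pvFin ([a].foldl fixPotholesStep (true, count, false, 0)) =
        fixPotholesChunks (PySem.List.slice [a] (some ((3 : Nat) : Int)) none)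
          (if PySem.Chars.isIn ['X'] (PySem.List.slice [a] (some 0) (some 3)) then count + 1 else count)
      rw [h1, h2, chunks_nil]
      simp only [isIn_X]
      by_cases ha : a = 'X' <;> simp [fixPotholesStep, pvFin, ha, @eq_comm _ 'X' a]
    | [a, b], _ =>
      have h1 : PySem.List.slice [a, b] (some 0) (some 3) = [a, b] := by
        simpa using PySem.List.slice_natCast (xs := [a, b]) (a := 0) (b := 3)
      have h2 : PySem.List.slice [a, b] (some ((3 : Nat) : Int)) none = ([] : List Char) := by
        rw [PySem.List.slice_from_natCast]; rfl
      rw [fixPotholesChunks, dif_neg (by simp)]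
      show pvFin ([a, b].foldl fixPotholesStep (true, count, false, 0)) =
        fixPotholesChunks (PySem.List.slice [a, b] (some ((3 : Nat) : Int)) none)
          (if PySem.Chars.isIn ['X'] (PySem.List.slice [a, b] (some 0) (some 3)) then count + 1 else count)
      rw [h1, h2, chunks_nil]
      simp only [isIn_X]
      by_cases ha : a = 'X' <;> by_cases hb : b = 'X' <;>
        simp [fixPotholesStep, pvFin, ha, hb, @eq_comm _ 'X' a, @eq_comm _ 'X' b]
    | a :: b :: c :: rest, hn =>
      have hrest : rest.length ≤ n - 1 := by simp at hn; omega
      have hn1 : n - 1 < n := by simp at hn; omega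
      have hstep : (a :: b :: c :: rest).foldl fixPotholesStep (true, count, false, 0) =
          rest.foldl fixPotholesStep
            (true, count + (if 'X' ∈ [a, b, c] then 1 else 0), false, 0) := by
        by_cases ha : a = 'X' <;> by_cases hb : b = 'X' <;> by_cases hc : c = 'X' <;>
          simp [fixPotholesStep, ha, hb, hc, @eq_comm _ 'X' a, @eq_comm _ 'X' b, @eq_comm _ 'X' c]
      have htake : PySem.List.slice (a :: b :: c :: rest) (some 0) (some 3) = [a, b, c] := by
        simpa using PySem.List.slice_natCast (xs := a :: b :: c :: rest) (a := 0) (b := 3)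
      have hdrop : PySem.List.slice (a :: b :: c :: rest) (some ((3 : Nat) : Int)) none = rest := by
        rw [PySem.List.slice_from_natCast]; rfl
      rw [hstep, ih _ hn1 _ hrest]
      conv_rhs => rw [fixPotholesChunks]
      rw [dif_neg (by simp : ¬(a :: b :: c :: rest = []))]
      show fixPotholesChunks rest (count + (if 'X' ∈ [a, b, c] then 1 else 0)) =
        fixPotholesChunks (PySem.List.slice (a :: b :: c :: rest) (some ((3 : Nat) : Int)) none)
          (if PySem.Chars.isIn ['X'] (PySem.List.slice (a :: b :: c :: rest) (some 0) (some 3))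
            then count + 1 else count)
      rw [htake, hdrop]
      simp only [isIn_X]
      by_cases hm : 'X' ∈ [a, b, c] <;> simp [hm]

-- the main bridge: A's find-then-chunk equals B's fold over the suffix from i,
-- provided no 'X' occurs before position i
lemma bridge : ∀ k (L : List Char) (i : Nat), L.length - i ≤ k → 'X' ∉ L.take i →
    fixPotholesChunks (fixPotholesFind L i) 0 =
      pvFin ((L.drop i).foldl fixPotholesStep (false, 0, false, 0)) := by
  intro k
  induction k with
  | zero =>
    intro L i hk hpre
    have hi : L.length ≤ i := by omega
    rw [fixPotholesFind, dif_neg (by omega)]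
    rw [List.drop_eq_nil_of_le hi]
    have hX : 'X' ∉ L := by rw [← List.take_of_length_le hi]; exact hpre
    rw [chunks_no_X L.length L le_rfl hX 0]
    simp [pvFin]
  | succ k ih =>
    intro L i hk hpre
    by_cases hi : i < L.length
    · have hget : PySem.List.pyGet? L (i : Int) = some L[i] := by
        simp [PySem.List.pyGet?_natCast, List.getElem?_eq_getElem hi]
      have hdropcons : L.drop i = L[i] :: L.drop (i + 1) := List.drop_eq_getElem_cons hi
      by_cases hc : L[i] = 'X'
      · rw [fixPotholesFind, dif_pos hi, if_pos (by simp [hget, hc])]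
        rw [PySem.List.slice_from_natCast]
        have h1 : (L.drop i).foldl fixPotholesStep (false, 0, false, 0) =
            (L.drop i).foldl fixPotholesStep (true, 0, false, 0) := by
          rw [hdropcons, hc]
          simp [fixPotholesStep]
        rw [h1]
        exact (core (L.drop i).length _ le_rfl 0).symm
      · rw [fixPotholesFind, dif_pos hi, if_neg (by simp [hget, hc])]
        have hpre' : 'X' ∉ L.take (i + 1) := by
          intro h
          rw [List.take_add_one, List.getElem?_eq_getElem hi] at h
          simp only [Option.toList_some, List.mem_append, List.mem_singleton] at h
          rcases h with h | h
          · exact hpre h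
          · exact hc h.symm
        have hstep0 : fixPotholesStep (false, 0, false, 0) L[i] = (false, 0, false, 0) := by
          simp [fixPotholesStep, hc]
        rw [ih L (i + 1) (by omega) hpre', hdropcons, List.foldl_cons, hstep0]
    · rw [fixPotholesFind, dif_neg hi]
      have hle : L.length ≤ i := Nat.not_lt.mp hi
      rw [List.drop_eq_nil_of_le hle]
      have hX : 'X' ∉ L := by rw [← List.take_of_length_le hle]; exact hpre
      rw [chunks_no_X L.length L le_rfl hX 0]
      simp [pvFin]

-- ===== VERDICT (by name: the statement is the Claim_ definition above) =====
theorem fix_potholes_spec : Claim_equal_fix_potholes := by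
  intro S _
  unfold Spec_fix_potholes fix_potholes fix_potholes_alt
  rw [bridge S.toList.length S.toList 0 (by omega) (by simp)]
  rfl
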